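-- pv_equiv track=rewrite | github.com/JackyyyWang/masksam2 | func_3d/dataset/prostate_dataset_boxes_isolated.py | fill_missing_bounding_boxes
-- ===== SOURCE A (Python) =====
-- def fill_missing_bounding_boxes(bounding_boxes):
--     """
--     Fill None bounding boxes with data from adjacent slices or a default value.
--
--     Args:
--         bounding_boxes: List of bounding box coordinates or None
--
--     Returns:
--         filled_bounding_boxes: List of bounding box coordinates with no None values
--     """
--     filled_bounding_boxes = bounding_boxes.copy()
--     z_dim = len(bounding_boxes)
--
--     # If all bounding boxes are None, use a default value for all
--     if all(box is None for box in bounding_boxes):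
--         # Default to a small box in the center
--         default_box = (64, 64, 192, 192)  # Adjust based on your image size
--         return [default_box] * z_dim
--
--     # Forward pass: fill None with the previous valid bounding box
--     last_valid_box = None
--     for z in range(z_dim):
--         if filled_bounding_boxes[z] is not None:
--             last_valid_box = filled_bounding_boxes[z]
--         elif last_valid_box is not None:
--             filled_bounding_boxes[z] = last_valid_box
--
--     # Backward pass: fill remaining None values with the next valid bounding box
--     last_valid_box = None
--     for z in range(z_dim - 1, -1, -1):
--         if filled_bounding_boxes[z] is not None:
--             last_valid_box = filled_bounding_boxes[z]
--         elif last_valid_box is not None: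
--             filled_bounding_boxes[z] = last_valid_box
--
--     return filled_bounding_boxes
-- ===== SOURCE B (Python) =====
-- def fill_missing_bounding_boxes(bounding_boxes):
--     first = next((b for b in bounding_boxes if b is not None), None)
--     if first is None:
--         return [(64, 64, 192, 192)] * len(bounding_boxes)
--     # single seeded forward pass: fold over the slices carrying the running
--     # last-valid box; leading Nones are filled with the first valid box
--     out = []
--     last = first
--     for box in bounding_boxes:
--         last = box if box is not None else last
--         out.append(last)
--     return out
-- ===== Notes on version B (the rewrite author's own statement) =====
-- stated objective: simpler
-- what changed: Replaces A's two opposing in-place fill sweeps (forward then backward over the copied list) by a single forward fold whose running last-valid accumulator is seeded with the first non-None box, building a fresh output list in one pass with no reverse traversal and no mutation.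
import Mathlib
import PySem

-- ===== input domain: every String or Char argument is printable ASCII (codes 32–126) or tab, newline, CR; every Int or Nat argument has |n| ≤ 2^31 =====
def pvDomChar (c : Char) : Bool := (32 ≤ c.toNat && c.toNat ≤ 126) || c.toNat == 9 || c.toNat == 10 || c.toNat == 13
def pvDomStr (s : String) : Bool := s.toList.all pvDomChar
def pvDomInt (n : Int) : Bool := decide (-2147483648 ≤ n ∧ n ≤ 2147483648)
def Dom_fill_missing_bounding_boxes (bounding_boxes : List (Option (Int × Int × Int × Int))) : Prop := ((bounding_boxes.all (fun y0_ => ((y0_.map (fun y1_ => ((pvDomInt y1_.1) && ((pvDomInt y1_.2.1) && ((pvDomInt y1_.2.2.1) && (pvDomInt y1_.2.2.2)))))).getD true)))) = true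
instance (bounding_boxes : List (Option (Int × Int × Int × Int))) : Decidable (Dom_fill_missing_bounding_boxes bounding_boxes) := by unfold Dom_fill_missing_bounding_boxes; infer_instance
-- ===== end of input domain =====

-- ===== PORT A =====
-- B replaces A's two opposing in-place fill sweeps with one seeded forward fold (objective: simpler).
-- One sweep of A's in-place fill loop: carries `last_valid_box`, keeps a valid
-- entry (updating the carry), replaces None by the carry when the carry is set.
-- A's forward loop is pvPassA none xs; the backward loop is the same sweep over
-- the reversed list, result reversed back.
def pvPassA (st : Option (Int × Int × Int × Int)) :
    List (Option (Int × Int × Int × Int)) → List (Option (Int × Int × Int × Int))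
  | [] => []
  | some b :: xs => some b :: pvPassA (some b) xs
  | none :: xs =>
    match st with
    | some b => some b :: pvPassA (some b) xs
    | none => none :: pvPassA none xs

def fill_missing_bounding_boxes (bounding_boxes : List (Option (Int × Int × Int × Int))) : List (Option (Int × Int × Int × Int)) :=
  if bounding_boxes.all (fun box => box.isNone) then
    List.replicate bounding_boxes.length (some (64, 64, 192, 192))
  else
    (pvPassA none ((pvPassA none bounding_boxes).reverse)).reverse

-- ===== PORT B =====
-- B's loop `last = box if box is not None else last; out.append(last)` is a left
-- fold over the slices carrying (last, out); out is accumulated reversed and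
-- reversed once at the end.
def fill_missing_bounding_boxes_alt (bounding_boxes : List (Option (Int × Int × Int × Int))) : List (Option (Int × Int × Int × Int)) :=
  match bounding_boxes.findSome? id with
  | none => List.replicate bounding_boxes.length (some (64, 64, 192, 192))
  | some first =>
    (bounding_boxes.foldl
      (fun (st : (Int × Int × Int × Int) × List (Option (Int × Int × Int × Int))) box =>
        let last := box.getD st.1
        (last, some last :: st.2))
      (first, [])).2.reverse

-- ===== PRECONDITION & SPEC =====
def Spec_fill_missing_bounding_boxes (bounding_boxes : List (Option (Int × Int × Int × Int))) (out : List (Option (Int × Int × Int × Int))) : Prop := out = fill_missing_bounding_boxes_alt bounding_boxes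
instance (bounding_boxes : List (Option (Int × Int × Int × Int))) (out : List (Option (Int × Int × Int × Int))) : Decidable (Spec_fill_missing_bounding_boxes bounding_boxes out) := by unfold Spec_fill_missing_bounding_boxes; infer_instance

-- ===== CLAIM (what is proved, stated in full; the proofs are below) =====
def Claim_equal_fill_missing_bounding_boxes : Prop := ∀ (bounding_boxes : List (Option (Int × Int × Int × Int))), Dom_fill_missing_bounding_boxes bounding_boxes → Spec_fill_missing_bounding_boxes bounding_boxes (fill_missing_bounding_boxes bounding_boxes)

-- ===== LEMMAS AND PROOFS =====

-- pvFillB is a proof-side description of B's seeded forward pass.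
def pvFillB (last : Int × Int × Int × Int) :
    List (Option (Int × Int × Int × Int)) → List (Option (Int × Int × Int × Int))
  | [] => []
  | some b :: xs => some b :: pvFillB b xs
  | none :: xs => some last :: pvFillB last xs

-- B's fold accumulates exactly pvFillB, reversed, in front of the accumulator.
theorem pvFoldB_spec (xs : List (Option (Int × Int × Int × Int)))
    (b : Int × Int × Int × Int) (acc : List (Option (Int × Int × Int × Int))) :
    (xs.foldl
      (fun (st : (Int × Int × Int × Int) × List (Option (Int × Int × Int × Int))) box =>
        let last := box.getD st.1
        (last, some last :: st.2))
      (b, acc)).2 = (pvFillB b xs).reverse ++ acc := by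
  induction xs generalizing b acc with
  | nil => simp [pvFillB]
  | cons x xs ih =>
    cases x with
    | none => simp [pvFillB, List.foldl, ih]
    | some c => simp [pvFillB, List.foldl, ih]

-- A's sweep with a set carry is exactly the seeded forward fill.
theorem pvPassA_some (b : Int × Int × Int × Int) (xs : List (Option (Int × Int × Int × Int))) :
    pvPassA (some b) xs = pvFillB b xs := by
  induction xs generalizing b with
  | nil => rfl
  | cons x xs ih =>
    cases x with
    | none => simp [pvPassA, pvFillB, ih]
    | some c => simp [pvPassA, pvFillB, ih]

-- Every output of the seeded forward fill is some.
theorem pvFillB_allSome (b : Int × Int × Int × Int) (xs : List (Option (Int × Int × Int × Int))) :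
    ∀ y ∈ pvFillB b xs, ∃ c, y = some c := by
  induction xs generalizing b with
  | nil => simp [pvFillB]
  | cons x xs ih =>
    cases x with
    | none =>
      intro y hy
      rcases (by simpa [pvFillB] using hy) with h | h
      · exact ⟨b, h⟩
      · exact ih b y h
    | some c =>
      intro y hy
      rcases (by simpa [pvFillB] using hy) with h | h
      · exact ⟨c, h⟩
      · exact ih c y h

-- A's sweep passes an all-some prefix through unchanged and continues with the
-- carry set to the element it just saw.
theorem pvPassA_allSome_prefix (ys : List (Option (Int × Int × Int × Int)))
    (hys : ∀ y ∈ ys, ∃ c, y = some c)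
    (st : Option (Int × Int × Int × Int)) (b : Int × Int × Int × Int)
    (zs : List (Option (Int × Int × Int × Int))) :
    pvPassA st (ys ++ some b :: zs) = ys ++ some b :: pvPassA (some b) zs := by
  induction ys generalizing st with
  | nil => cases st <;> simp [pvPassA]
  | cons y ys ih =>
    obtain ⟨c, rfl⟩ := hys y (by simp)
    simp [pvPassA, ih (fun y hy => hys y (by simp [hy]))]

theorem pvFillB_replicate_append (b : Int × Int × Int × Int) (k : ℕ)
    (xs : List (Option (Int × Int × Int × Int))) :
    pvFillB b (List.replicate k none ++ xs) = List.replicate k (some b) ++ pvFillB b xs := by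
  induction k with
  | zero => simp
  | succ k ih => simp [List.replicate_succ, pvFillB, ih]

theorem pvPassA_none_replicate_append (k : ℕ) (xs : List (Option (Int × Int × Int × Int))) :
    pvPassA none (List.replicate k none ++ xs) = List.replicate k none ++ pvPassA none xs := by
  induction k with
  | zero => simp
  | succ k ih => simp [List.replicate_succ, pvPassA, ih]

theorem findSome?_replicate_none (k : ℕ) (b : Int × Int × Int × Int)
    (rest : List (Option (Int × Int × Int × Int))) :
    (List.replicate k (none : Option (Int × Int × Int × Int)) ++ some b :: rest).findSome? id = some b := by
  induction k with
  | zero => simp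
  | succ k ih => simp [List.replicate_succ, ih]

theorem findSome?_of_allNone (xs : List (Option (Int × Int × Int × Int)))
    (h : xs.all (fun box => box.isNone) = true) : xs.findSome? id = none := by
  induction xs with
  | nil => rfl
  | cons x xs ih =>
    cases x with
    | none => simpa [List.findSome?] using ih (by simpa using h)
    | some c => simp at h

-- Every list is all-None or splits at its first valid box.
theorem pvDecompose (xs : List (Option (Int × Int × Int × Int))) :
    xs.all (fun box => box.isNone) = true ∨
      ∃ k b rest, xs = List.replicate k (none : Option (Int × Int × Int × Int)) ++ some b :: rest := by
  induction xs with
  | nil => left; rfl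
  | cons x xs ih =>
    cases x with
    | some b => exact Or.inr ⟨0, b, xs, by simp⟩
    | none =>
      rcases ih with h | ⟨k, b, rest, rfl⟩
      · left; simpa using h
      · exact Or.inr ⟨k + 1, b, rest, by simp [List.replicate_succ]⟩

-- ===== VERDICT (by name: the statement is the Claim_ definition above) =====
theorem fill_missing_bounding_boxes_spec : Claim_equal_fill_missing_bounding_boxes := by
  intro xs _
  unfold Spec_fill_missing_bounding_boxes fill_missing_bounding_boxes fill_missing_bounding_boxes_alt
  rcases pvDecompose xs with h | ⟨k, b, rest, rfl⟩
  · rw [if_pos h, findSome?_of_allNone xs h]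
  · have hall : (List.replicate k (none : Option (Int × Int × Int × Int)) ++ some b :: rest).all
        (fun box => box.isNone) = false := by simp
    rw [hall, findSome?_replicate_none]
    simp only [Bool.false_eq_true, if_false]
    rw [pvFoldB_spec, List.append_nil, List.reverse_reverse]
    rw [pvPassA_none_replicate_append]
    have h1 : pvPassA none (some b :: rest) = some b :: pvFillB b rest := by
      simp [pvPassA, pvPassA_some]
    rw [h1]
    have hrev : (List.replicate k (none : Option (Int × Int × Int × Int)) ++
        some b :: pvFillB b rest).reverse
        = (pvFillB b rest).reverse ++ some b :: List.replicate k none := by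
      simp [List.reverse_append]
    have h2 : pvFillB b (List.replicate k none) = List.replicate k (some b) := by
      simpa [pvFillB] using pvFillB_replicate_append b k []
    rw [hrev, pvPassA_allSome_prefix _ (fun y hy => pvFillB_allSome b rest y (by simpa using hy)),
      pvPassA_some, h2, pvFillB_replicate_append]
    simp [pvFillB]
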